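-- pv_equiv track=rewrite | github.com/limdongsun0814/Algorithm | 프로그래머스/3/12938. 최고의 집합/최고의 집합.py | solution
-- ===== SOURCE A (Python) =====
-- def solution(n, s):
--     answer = []
--     if n>s:
--         return [-1]
--     for i in range(n):
--         answer.append(s//n)
--         if s%n!=0:
--             answer[-1]+=1
--             s-=1
--     answer.sort()
--     return answer
-- ===== SOURCE B (Python) =====
-- def solution(n, s):
--     if n > s:
--         return [-1]
--     if n <= 0:
--         return []
--     q, r = divmod(s, n)
--     return [q] * (n - r) + [q + 1] * r
-- ===== Notes on version B (the rewrite author's own statement) =====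
-- stated objective: faster
-- what changed: Replaces A's n-iteration loop (appending s//n with per-unit decrement of s) followed by a sort with the direct closed-form construction [s//n]*(n-r) + [s//n+1]*r where r = s%n.
import Mathlib
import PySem

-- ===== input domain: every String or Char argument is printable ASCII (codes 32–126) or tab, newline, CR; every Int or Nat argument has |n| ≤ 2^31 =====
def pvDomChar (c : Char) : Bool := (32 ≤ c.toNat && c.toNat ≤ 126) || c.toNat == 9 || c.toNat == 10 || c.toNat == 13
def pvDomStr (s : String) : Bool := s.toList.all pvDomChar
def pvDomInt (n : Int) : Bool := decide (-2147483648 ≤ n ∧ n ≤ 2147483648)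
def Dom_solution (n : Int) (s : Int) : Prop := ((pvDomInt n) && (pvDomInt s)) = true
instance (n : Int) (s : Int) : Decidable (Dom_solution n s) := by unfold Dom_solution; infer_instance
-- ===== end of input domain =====

-- B replaces A's per-unit distribution loop + sort by the direct closed-form construction
-- [s//n]*(n-r) ++ [s//n+1]*r with r = s%n  (objective: faster, O(n log n) → O(n)).

-- ===== PORT A =====
-- loop body: answer.append(s//n); if s%n!=0: answer[-1]+=1; s-=1   (state = (answer, s))
def solutionStep (n : Int) (st : List Int × Int) (_i : Int) : List Int × Int :=
  let answer := st.1 ++ [PySem.Int.floordiv st.2 n]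
  if PySem.Int.mod st.2 n ≠ 0 then
    (answer.dropLast ++ [answer.getLastD 0 + 1], st.2 - 1)
  else
    (answer, st.2)

def solution (n : Int) (s : Int) : List Int :=
  if n > s then [-1]
  else
    let st := (PySem.List.pyRange 0 n 1).foldl (solutionStep n) (([] : List Int), s)
    PySem.List.sorted st.1 (fun x => x) false

-- ===== PORT B =====
def solution_alt (n : Int) (s : Int) : List Int :=
  if n > s then [-1]
  else if n ≤ 0 then []
  else
    let q := PySem.Int.floordiv s n
    let r := PySem.Int.mod s n
    List.replicate (n - r).toNat q ++ List.replicate r.toNat (q + 1)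

-- ===== PRECONDITION & SPEC =====
def Spec_solution (n : Int) (s : Int) (out : List Int) : Prop := out = solution_alt n s
instance (n : Int) (s : Int) (out : List Int) : Decidable (Spec_solution n s out) := by unfold Spec_solution; infer_instance

-- ===== CLAIM (what is proved, stated in full; the proofs are below) =====
def Claim_equal_solution : Prop := ∀ (n : Int) (s : Int), Dom_solution n s → Spec_solution n s (solution n s)

-- ===== LEMMAS AND PROOFS =====

theorem solution_loop (n : Int) (hn : 0 < n) :
    ∀ (l : List Int) (acc : List Int) (s : Int),
      l.foldl (solutionStep n) (acc, s)
        = (acc ++ List.replicate (min l.length (s % n).toNat) (s / n + 1)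
               ++ List.replicate (l.length - (s % n).toNat) (s / n),
           s - min l.length (s % n).toNat) := by
  intro l
  induction l with
  | nil => intro acc s; simp
  | cons x t ih =>
    intro acc s
    have hfd : PySem.Int.floordiv s n = s / n := PySem.Int.floordiv_eq_ediv_of_pos hn
    have hmd : PySem.Int.mod s n = s % n := PySem.Int.mod_eq_emod_of_pos hn
    have hr0 : 0 ≤ s % n := Int.emod_nonneg s (ne_of_gt hn)
    have hrn : s % n < n := Int.emod_lt_of_pos s hn
    by_cases hz : s % n = 0
    · have : solutionStep n (acc, s) x = (acc ++ [s / n], s) := by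
        simp [solutionStep, hfd, hmd, hz]
      rw [List.foldl_cons, this, ih]
      simp [hz, List.replicate_succ]
    · have hstep : solutionStep n (acc, s) x = (acc ++ [s / n + 1], s - 1) := by
        simp only [solutionStep, hfd, hmd, if_pos hz]
        simp
      have heq : n * (s / n) + s % n = s := Int.mul_ediv_add_emod s n
      have habs : |n| = n := abs_of_pos hn
      have hdm := (Int.ediv_emod_unique'' (a := s - 1) (b := n)
          (r := s % n - 1) (q := s / n) (ne_of_gt hn)).mpr
          ⟨by omega, by omega, by rw [habs]; omega⟩
      have hd1 : (s - 1) / n = s / n := hdm.1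
      have hm1 : (s - 1) % n = s % n - 1 := hdm.2
      rw [List.foldl_cons, hstep, ih, hd1, hm1]
      simp only [Prod.mk.injEq]
      have h1 : min (t.length + 1) (s % n).toNat = min t.length (s % n - 1).toNat + 1 := by
        omega
      have h2 : t.length - (s % n - 1).toNat = t.length + 1 - (s % n).toNat := by omega
      constructor
      · simp only [List.length_cons, h1, h2, List.replicate_succ, List.append_assoc,
          List.cons_append, List.nil_append]
      · simp only [List.length_cons, h1]; omega

-- ===== VERDICT =====
theorem solution_spec : Claim_equal_solution := by
  intro n s _
  unfold Spec_solution solution solution_alt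
  by_cases hgt : n > s
  · simp [hgt]
  · simp only [if_neg hgt]
    by_cases hle : n ≤ 0
    · have : PySem.List.pyRange 0 n 1 = [] := PySem.List.pyRange_one_eq_nil (by omega)
      simp [this, hle, PySem.List.sorted]
    · have hn : 0 < n := by omega
      rw [solution_loop n hn]
      have hr0 : 0 ≤ s % n := Int.emod_nonneg s (ne_of_gt hn)
      have hrn : s % n < n := Int.emod_lt_of_pos s hn
      have hlen : (PySem.List.pyRange 0 n 1).length = n.toNat := by
        rw [PySem.List.length_pyRange_one]; omega
      have hmin : min (PySem.List.pyRange 0 n 1).length (s % n).toNat = (s % n).toNat := by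
        omega
      have hfd : PySem.Int.floordiv s n = s / n := PySem.Int.floordiv_eq_ediv_of_pos hn
      have hmd : PySem.Int.mod s n = s % n := PySem.Int.mod_eq_emod_of_pos hn
      simp only [hlen, List.nil_append, if_neg hle, hfd, hmd]
      have hmin' : min n.toNat (s % n).toNat = (s % n).toNat := by omega
      have hnr : (n - s % n).toNat = n.toNat - (s % n).toNat := by omega
      rw [hmin', hnr]
      apply PySem.List.sorted_id_eq_of_perm_of_pairwise
      · exact List.perm_append_comm
      · rw [List.pairwise_append]
        refine ⟨List.pairwise_replicate.mpr (Or.inr le_rfl),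
                List.pairwise_replicate.mpr (Or.inr le_rfl), ?_⟩
        intro a ha b hb
        rw [List.eq_of_mem_replicate ha, List.eq_of_mem_replicate hb]
        omega
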